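-- pv_equiv track=rewrite | github.com/23adrian2300/WDI-AGH | Zestaw 2/Zestaw 2.py | create_number
-- ===== SOURCE A (Python) =====
-- def create_number(org_num, mask):
--     new_rev_num = 0
--     while org_num > 0:
--         if mask % 2 == 1:
--             new_rev_num *= 10
--             new_rev_num += org_num % 10
--         mask //= 2
--         org_num //= 10
--
--     new_num = 0
--     while new_rev_num > 0:
--         new_num *= 10
--         new_num += new_rev_num % 10
--         new_rev_num //= 10
--
--     return new_num
-- ===== SOURCE B (Python) =====
-- def create_number(org_num, mask):
--     # single pass: place each selected digit with a growing power-of-ten multiplier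
--     result = 0
--     place = 1
--     while org_num > 0:
--         if mask & 1:
--             result += (org_num % 10) * place
--             place *= 10
--         mask >>= 1
--         org_num //= 10
--     return result
-- ===== Notes on version B (the rewrite author's own statement) =====
-- stated objective: simpler
-- what changed: B builds the result in a single pass, placing each mask-selected digit with a growing power-of-ten multiplier, instead of A's reverse-accumulate loop followed by a second digit-reversal loop.
-- intended difference: On positive org_num whose lowest mask-selected digit is 0 while some higher selected digit is nonzero, A's double reversal silently drops those low zeros (A(20,3)=2) while B keeps them (B(20,3)=20), the intended number built from the selected digits. — e.g. on create_number(20, 3): A returns 2, B returns 20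
import Mathlib
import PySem

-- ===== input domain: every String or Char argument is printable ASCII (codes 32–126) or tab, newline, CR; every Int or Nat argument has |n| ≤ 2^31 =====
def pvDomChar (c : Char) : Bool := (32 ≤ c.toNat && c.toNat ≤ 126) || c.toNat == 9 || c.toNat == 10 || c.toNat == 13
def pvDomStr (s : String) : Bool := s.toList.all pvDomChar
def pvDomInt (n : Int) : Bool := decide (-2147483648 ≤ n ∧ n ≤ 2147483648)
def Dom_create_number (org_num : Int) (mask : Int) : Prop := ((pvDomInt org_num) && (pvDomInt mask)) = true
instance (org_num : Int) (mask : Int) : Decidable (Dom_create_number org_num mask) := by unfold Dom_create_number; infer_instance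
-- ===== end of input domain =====

-- B replaces A's reverse-accumulate-then-reverse two-loop structure by a single pass with a
-- power-of-ten place accumulator (objective: simpler); B intentionally keeps low-order selected
-- zero digits that A drops (see D_create_number).

-- termination measure fact cited by the three loop ports below
theorem pvDecTen (org : Int) (h : 0 < org) : (PySem.Int.floordiv org 10).toNat < org.toNat := by
  rw [PySem.Int.floordiv_eq_ediv_of_pos (by decide)]
  exact (Int.toNat_lt_toNat h).mpr
    (Int.ediv_lt_of_lt_mul (by decide) (lt_mul_of_one_lt_right h (by decide)))

-- ===== PORT A =====
-- first while loop: select digits of org_num by mask bits, accumulating them reversed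
def createLoop1 (org_num mask new_rev_num : Int) : Int :=
  if 0 < org_num then
    createLoop1 (PySem.Int.floordiv org_num 10) (PySem.Int.floordiv mask 2)
      (if PySem.Int.mod mask 2 = 1 then new_rev_num * 10 + PySem.Int.mod org_num 10 else new_rev_num)
  else new_rev_num
termination_by org_num.toNat
decreasing_by exact pvDecTen _ (by assumption)

-- second while loop: reverse the digits of new_rev_num
def createLoop2 (new_rev_num new_num : Int) : Int :=
  if 0 < new_rev_num then
    createLoop2 (PySem.Int.floordiv new_rev_num 10) (new_num * 10 + PySem.Int.mod new_rev_num 10)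
  else new_num
termination_by new_rev_num.toNat
decreasing_by exact pvDecTen _ (by assumption)

def create_number (org_num : Int) (mask : Int) : Int :=
  createLoop2 (createLoop1 org_num mask 0) 0

-- ===== PORT B =====
-- the single while loop of B: `mask & 1` truthiness is `band mask 1 ≠ 0`, `mask >>= 1` is `>>> 1`
def createAltLoop (org_num mask result place : Int) : Int :=
  if 0 < org_num then
    if PySem.Int.band mask 1 ≠ 0 then
      createAltLoop (PySem.Int.floordiv org_num 10) (mask >>> 1)
        (result + PySem.Int.mod org_num 10 * place) (place * 10)
    else
      createAltLoop (PySem.Int.floordiv org_num 10) (mask >>> 1) result place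
  else result
termination_by org_num.toNat
decreasing_by all_goals exact pvDecTen _ (by assumption)

def create_number_alt (org_num : Int) (mask : Int) : Int :=
  createAltLoop org_num mask 0 1

-- ===== PRECONDITION & SPEC =====
-- helper for D_: the decimal digits of org (least-significant first) at positions where mask has a set bit
def selDigits (org mask : Int) : List Nat :=
  ((Nat.digits 10 org.toNat).zipIdx.filter fun p => mask.testBit p.2).map Prod.fst

-- On positive org_num whose lowest mask-selected digit is 0 while some higher selected digit is
-- nonzero, A's double reversal drops those low zeros (A(20,3)=2) while B keeps them (B(20,3)=20),
-- the intended number built from the selected digits.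
def D_create_number (org_num : Int) (mask : Int) : Prop :=
  (selDigits org_num mask).head? = some 0 ∧ ∃ d ∈ selDigits org_num mask, d ≠ 0
instance (org_num : Int) (mask : Int) : Decidable (D_create_number org_num mask) := by
  unfold D_create_number; infer_instance

def Spec_create_number (org_num : Int) (mask : Int) (out : Int) : Prop :=
  ¬ D_create_number org_num mask → out = create_number_alt org_num mask
instance (org_num : Int) (mask : Int) (out : Int) : Decidable (Spec_create_number org_num mask out) := by
  unfold Spec_create_number; infer_instance

def pvDiffWitness_create_number : Int × Int := (20, 3)
def pvDiffWitnessOut_create_number : Int × Int := (2, 20)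

-- ===== CLAIM (what is proved, stated in full; the proofs are below) =====
def Claim_unchanged_create_number : Prop := ∀ (org_num : Int) (mask : Int), Dom_create_number org_num mask → Spec_create_number org_num mask (create_number org_num mask)
def Claim_changed_create_number : Prop := Dom_create_number (pvDiffWitness_create_number.1) (pvDiffWitness_create_number.2) ∧ D_create_number (pvDiffWitness_create_number.1) (pvDiffWitness_create_number.2) ∧ create_number (pvDiffWitness_create_number.1) (pvDiffWitness_create_number.2) = pvDiffWitnessOut_create_number.1 ∧ create_number_alt (pvDiffWitness_create_number.1) (pvDiffWitness_create_number.2) = pvDiffWitnessOut_create_number.2 ∧ pvDiffWitnessOut_create_number.1 ≠ pvDiffWitnessOut_create_number.2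
def Claim_exact_create_number : Prop := ∀ (org_num : Int) (mask : Int), Dom_create_number org_num mask → D_create_number org_num mask → create_number org_num mask ≠ create_number_alt org_num mask

-- ===== LEMMAS AND PROOFS =====

theorem testBit_zero_iff (m : Int) : m.testBit 0 = true ↔ PySem.Int.mod m 2 = 1 := by
  cases m with
  | ofNat n =>
    rw [show (Int.ofNat n).testBit 0 = n.testBit 0 from rfl, Nat.testBit_zero,
      show PySem.Int.mod (Int.ofNat n) 2 = ((n % 2 : Nat) : Int) from
        by exact_mod_cast PySem.Int.mod_natCast n 2]
    simp only [decide_eq_true_eq]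
    omega
  | negSucc n =>
    rw [show (Int.negSucc n).testBit 0 = !(n.testBit 0) from rfl, Nat.testBit_zero,
      PySem.Int.mod_eq_emod_of_pos (by decide), Int.negSucc_eq]
    simp only [Bool.not_eq_eq_eq_not, Bool.not_true, decide_eq_false_iff_not]
    omega

theorem testBit_succ_int (m : Int) (k : Nat) :
    m.testBit (k + 1) = (PySem.Int.floordiv m 2).testBit k := by
  cases m with
  | ofNat n =>
    rw [show PySem.Int.floordiv (Int.ofNat n) 2 = ((n / 2 : Nat) : Int) from
        by exact_mod_cast PySem.Int.floordiv_natCast n 2]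
    exact Nat.testBit_succ n k
  | negSucc n =>
    rw [show PySem.Int.floordiv (Int.negSucc n) 2 = Int.negSucc (n / 2) from by
        rw [PySem.Int.floordiv_eq_ediv_of_pos (by decide), Int.negSucc_eq, Int.negSucc_eq]
        omega]
    show (!(n.testBit (k + 1))) = !((n / 2).testBit k)
    rw [Nat.testBit_succ]

theorem zipIdx_shift (l : List Nat) : ∀ (k : Nat) (m : Int),
    ((l.zipIdx (k + 1)).filter fun p => m.testBit p.2).map Prod.fst =
      ((l.zipIdx k).filter fun p => (PySem.Int.floordiv m 2).testBit p.2).map Prod.fst := by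
  induction l with
  | nil => intro _ _; rfl
  | cons a t ih =>
    intro k m
    simp only [List.zipIdx_cons, List.filter_cons]
    rw [testBit_succ_int m k]
    by_cases hb : (PySem.Int.floordiv m 2).testBit k = true
    · rw [if_pos hb, if_pos hb, List.map_cons, List.map_cons, ih (k + 1) m]
    · rw [if_neg hb, if_neg hb, ih (k + 1) m]

theorem selDigits_nil (org mask : Int) (h : org ≤ 0) : selDigits org mask = [] := by
  unfold selDigits
  rw [Int.toNat_of_nonpos h]
  rfl

theorem selDigits_rec (n : Nat) (mask : Int) (h : 0 < n) :
    selDigits (n : Int) mask =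
      (if PySem.Int.mod mask 2 = 1 then [n % 10] else []) ++
        selDigits ((n / 10 : Nat) : Int) (PySem.Int.floordiv mask 2) := by
  unfold selDigits
  rw [Int.toNat_natCast, Int.toNat_natCast, Nat.digits_def' (by norm_num : 1 < 10) h]
  simp only [List.zipIdx_cons, List.filter_cons]
  by_cases hb : PySem.Int.mod mask 2 = 1
  · have hb' : mask.testBit 0 = true := (testBit_zero_iff mask).mpr hb
    rw [if_pos hb', if_pos hb, List.map_cons, zipIdx_shift]
    rfl
  · have hb' : ¬ mask.testBit 0 = true := fun hc => hb ((testBit_zero_iff mask).mp hc)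
    rw [if_neg hb', if_neg hb, zipIdx_shift]
    rfl

theorem selDigits_lt_ten (org mask : Int) : ∀ d ∈ selDigits org mask, d < 10 := by
  intro d hd
  unfold selDigits at hd
  obtain ⟨p, hmem, rfl⟩ := List.mem_map.mp hd
  exact Nat.digits_lt_base (by norm_num)
    (List.fst_mem_of_mem_zipIdx (List.mem_of_mem_filter hmem))

theorem createLoop1_eq (n : Nat) : ∀ (mask : Int) (acc : Nat),
    createLoop1 (n : Int) mask (acc : Int) =
      ((acc * 10 ^ (selDigits (n : Int) mask).length +
        Nat.ofDigits 10 (selDigits (n : Int) mask).reverse : Nat) : Int) := by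
  induction n using Nat.strong_induction_on with
  | _ n ih =>
    intro mask acc
    rw [createLoop1]
    by_cases h : 0 < n
    · rw [if_pos (by exact_mod_cast h)]
      rw [show PySem.Int.floordiv (n : Int) 10 = ((n / 10 : Nat) : Int) from
            PySem.Int.floordiv_natCast n 10,
          show PySem.Int.mod (n : Int) 10 = ((n % 10 : Nat) : Int) from
            PySem.Int.mod_natCast n 10]
      rw [selDigits_rec n mask h]
      by_cases hb : PySem.Int.mod mask 2 = 1
      · rw [if_pos hb]
        have : (acc : Int) * 10 + ((n % 10 : Nat) : Int) = ((acc * 10 + n % 10 : Nat) : Int) := by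
          push_cast; ring
        rw [this, ih (n / 10) (Nat.div_lt_self h (by norm_num)) _ _]
        simp only [if_pos hb, List.singleton_append, List.reverse_cons, List.length_cons,
          Nat.ofDigits_append, Nat.ofDigits_cons, Nat.ofDigits_nil, List.length_reverse]
        push_cast; ring
      · rw [if_neg hb, ih (n / 10) (Nat.div_lt_self h (by norm_num)) _ _]
        simp only [if_neg hb, List.nil_append]
    · obtain rfl : n = 0 := by omega
      rw [if_neg (by exact_mod_cast h)]
      simp [selDigits]

theorem createLoop2_eq (n : Nat) : ∀ (acc : Nat),
    createLoop2 (n : Int) (acc : Int) =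
      ((acc * 10 ^ (Nat.digits 10 n).length +
        Nat.ofDigits 10 (Nat.digits 10 n).reverse : Nat) : Int) := by
  induction n using Nat.strong_induction_on with
  | _ n ih =>
    intro acc
    rw [createLoop2]
    by_cases h : 0 < n
    · rw [if_pos (by exact_mod_cast h)]
      rw [show PySem.Int.floordiv (n : Int) 10 = ((n / 10 : Nat) : Int) from
            PySem.Int.floordiv_natCast n 10,
          show PySem.Int.mod (n : Int) 10 = ((n % 10 : Nat) : Int) from
            PySem.Int.mod_natCast n 10]
      have : (acc : Int) * 10 + ((n % 10 : Nat) : Int) = ((acc * 10 + n % 10 : Nat) : Int) := by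
        push_cast; ring
      rw [this, ih (n / 10) (Nat.div_lt_self h (by norm_num)) _]
      rw [Nat.digits_def' (by norm_num : 1 < 10) h]
      simp only [List.reverse_cons, List.length_cons, Nat.ofDigits_append, Nat.ofDigits_cons,
        Nat.ofDigits_nil, List.length_reverse]
      push_cast; ring
    · obtain rfl : n = 0 := by omega
      rw [if_neg (by exact_mod_cast h)]
      simp

theorem shiftRight_one_eq (a : Int) : a >>> (1 : Int) = PySem.Int.floordiv a 2 := by
  have h1 : a >>> (1 : Int) = a >>> ((1 : Nat) : Int) := by norm_num
  rw [h1, Int.shiftRight_natCast_right, Int.shiftRight_eq_div_pow,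
    PySem.Int.floordiv_eq_ediv_of_pos (by norm_num)]
  norm_num

theorem band_one_ne_zero (mask : Int) : (PySem.Int.band mask 1 ≠ 0) ↔ PySem.Int.mod mask 2 = 1 := by
  rw [PySem.Int.band_one]
  rcases PySem.Int.mod_two_eq mask with h | h <;> rw [h] <;> simp

theorem createAltLoop_eq (n : Nat) : ∀ (mask : Int) (res p : Nat),
    createAltLoop (n : Int) mask (res : Int) (p : Int) =
      ((res + p * Nat.ofDigits 10 (selDigits (n : Int) mask) : Nat) : Int) := by
  induction n using Nat.strong_induction_on with
  | _ n ih =>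
    intro mask res p
    rw [createAltLoop]
    by_cases h : 0 < n
    · rw [if_pos (by exact_mod_cast h)]
      rw [selDigits_rec n mask h]
      rw [show PySem.Int.floordiv (n : Int) 10 = ((n / 10 : Nat) : Int) from
            PySem.Int.floordiv_natCast n 10,
          show PySem.Int.mod (n : Int) 10 = ((n % 10 : Nat) : Int) from
            PySem.Int.mod_natCast n 10,
          shiftRight_one_eq]
      by_cases hb : PySem.Int.mod mask 2 = 1
      · rw [if_pos ((band_one_ne_zero mask).mpr hb)]
        have h1 : (res : Int) + ((n % 10 : Nat) : Int) * (p : Int) =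
            ((res + n % 10 * p : Nat) : Int) := by push_cast; ring
        have h2 : (p : Int) * 10 = ((p * 10 : Nat) : Int) := by push_cast; ring
        rw [h1, h2, ih (n / 10) (Nat.div_lt_self h (by norm_num)) _ _ _]
        simp only [if_pos hb, List.singleton_append, Nat.ofDigits_cons]
        push_cast; ring
      · rw [if_neg (fun hc => hb ((band_one_ne_zero mask).mp hc))]
        rw [ih (n / 10) (Nat.div_lt_self h (by norm_num)) _ _ _]
        simp only [if_neg hb, List.nil_append]
    · obtain rfl : n = 0 := by omega
      rw [if_neg (by exact_mod_cast h)]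
      simp [selDigits]

theorem ofDigits_allzero (L : List Nat) (h : ∀ d ∈ L, d = 0) : Nat.ofDigits 10 L = 0 := by
  induction L with
  | nil => simp
  | cons d t ih =>
    have hd : d = 0 := h d (by simp)
    have := ih (fun x hx => h x (by simp [hx]))
    simp [Nat.ofDigits_cons, hd, this]

theorem ofDigits_pos (L : List Nat) (h : ∃ d ∈ L, d ≠ 0) : 0 < Nat.ofDigits 10 L := by
  induction L with
  | nil => simp at h
  | cons d t ih =>
    rw [Nat.ofDigits_cons]
    obtain ⟨x, hx, hxn⟩ := h
    rcases List.mem_cons.mp hx with rfl | hxt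
    · omega
    · have := ih ⟨x, hxt, hxn⟩; omega

-- A on nonnegative inputs, fully characterised
theorem create_number_eq (n : Nat) (mask : Int) :
    create_number (n : Int) mask =
      ((Nat.ofDigits 10
        (Nat.digits 10 (Nat.ofDigits 10 (selDigits (n : Int) mask).reverse)).reverse : Nat) : Int) := by
  unfold create_number
  rw [show (0 : Int) = ((0 : Nat) : Int) from rfl, createLoop1_eq]
  simp only [Nat.zero_mul, Nat.zero_add]
  rw [createLoop2_eq]
  simp

theorem create_number_alt_eq (n : Nat) (mask : Int) :
    create_number_alt (n : Int) mask =
      ((Nat.ofDigits 10 (selDigits (n : Int) mask) : Nat) : Int) := by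
  unfold create_number_alt
  rw [show (0 : Int) = ((0 : Nat) : Int) from rfl, show (1 : Int) = ((1 : Nat) : Int) from rfl,
    createAltLoop_eq]
  simp

theorem nonpos_case (org mask : Int) (h : ¬ 0 < org) :
    create_number org mask = 0 ∧ create_number_alt org mask = 0 := by
  constructor
  · unfold create_number
    rw [createLoop1, if_neg h, createLoop2, if_neg (by norm_num)]
  · unfold create_number_alt
    rw [createAltLoop, if_neg h]

-- ===== VERDICT (by name: the statement is the Claim_ definition above) =====
theorem create_number_spec : Claim_unchanged_create_number := by
  intro org mask _ hnd
  by_cases h : 0 < org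
  · obtain ⟨n, rfl⟩ : ∃ n : Nat, org = (n : Int) := ⟨org.toNat, (Int.toNat_of_nonneg h.le).symm⟩
    rw [create_number_eq, create_number_alt_eq]
    norm_cast
    by_cases hex : ∃ d ∈ selDigits (n : Int) mask, d ≠ 0
    · -- some selected digit nonzero; ¬D_ forces a nonzero lowest digit, so digits round-trips
      have hhead : (selDigits (n : Int) mask).head? ≠ some 0 := fun hh => hnd ⟨hh, hex⟩
      obtain ⟨d0, t, hLc⟩ : ∃ d0 t, selDigits (n : Int) mask = d0 :: t := by
        cases hc : selDigits (n : Int) mask with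
        | nil => obtain ⟨x, hx, -⟩ := hex; rw [hc] at hx; simp at hx
        | cons a b => exact ⟨a, b, rfl⟩
      have hd0 : d0 ≠ 0 := by intro h0; apply hhead; rw [hLc, h0]; rfl
      rw [hLc]
      have hlt : ∀ l ∈ (d0 :: t).reverse, l < 10 := by
        intro l hl
        have hm : l ∈ selDigits (n : Int) mask := by rw [hLc]; exact List.mem_reverse.mp hl
        exact selDigits_lt_ten (n : Int) mask l hm
      have hlast : ∀ (hne : (d0 :: t).reverse ≠ []), (d0 :: t).reverse.getLast hne ≠ 0 := by
        intro hne h0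
        have h1 : (d0 :: t).reverse.getLast? = some d0 := by rw [List.getLast?_reverse]; rfl
        rw [List.getLast?_eq_some_getLast hne, h0] at h1
        exact hd0 (Option.some.inj h1).symm
      rw [Nat.digits_ofDigits 10 (by norm_num) _ hlt hlast, List.reverse_reverse]
    · push Not at hex
      rw [ofDigits_allzero _ hex, ofDigits_allzero _ (fun d hd => hex d (List.mem_reverse.mp hd))]
      simp
  · obtain ⟨h1, h2⟩ := nonpos_case org mask h
    rw [h1, h2]

theorem create_number_changed : Claim_changed_create_number := by
  unfold Claim_changed_create_number
  refine ⟨by decide, by decide, ?_, ?_, by decide⟩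
  · show create_number 20 3 = 2
    have h := create_number_eq 20 3
    norm_num at h
    rw [h]; decide
  · show create_number_alt 20 3 = 20
    have h := create_number_alt_eq 20 3
    norm_num at h
    rw [h]; decide

theorem create_number_tight : Claim_exact_create_number := by
  intro org mask _ hd
  obtain ⟨hhead, hex⟩ := hd
  have h : 0 < org := by
    by_contra hle
    rw [selDigits_nil org mask (by omega)] at hhead
    simp at hhead
  obtain ⟨n, rfl⟩ : ∃ n : Nat, org = (n : Int) := ⟨org.toNat, (Int.toNat_of_nonneg h.le).symm⟩
  rw [create_number_eq, create_number_alt_eq]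
  obtain ⟨t, hLc⟩ : ∃ t, selDigits (n : Int) mask = 0 :: t := by
    cases hc : selDigits (n : Int) mask with
    | nil => rw [hc] at hhead; simp at hhead
    | cons a b =>
      rw [hc] at hhead; simp at hhead
      exact ⟨b, by rw [hhead]⟩
  rw [hLc]
  have hext : ∃ d ∈ t, d ≠ 0 := by
    obtain ⟨x, hx, hxn⟩ := hex
    rw [hLc] at hx
    rcases List.mem_cons.mp hx with rfl | hxt
    · exact absurd rfl hxn
    · exact ⟨x, hxt, hxn⟩
  -- trailing zero of the reversed selected digits does not change their value R
  have hR : Nat.ofDigits 10 ((0 :: t) : List Nat).reverse = Nat.ofDigits 10 t.reverse := by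
    simp [Nat.ofDigits_append]
  have hRpos : 0 < Nat.ofDigits 10 t.reverse :=
    ofDigits_pos _ (by obtain ⟨x, hx, hxn⟩ := hext; exact ⟨x, List.mem_reverse.mpr hx, hxn⟩)
  intro heq
  norm_cast at heq
  rw [hR] at heq
  -- A's value starts with R's nonzero most-significant digit, so A % 10 ≠ 0; B % 10 = 0
  have hdig_ne : Nat.digits 10 (Nat.ofDigits 10 t.reverse) ≠ [] :=
    Nat.digits_ne_nil_iff_ne_zero.mpr (by omega)
  have hlast := Nat.getLast_digit_ne_zero 10 (m := Nat.ofDigits 10 t.reverse) (by omega)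
  obtain ⟨h', rest, hrev⟩ :
      ∃ h' rest, (Nat.digits 10 (Nat.ofDigits 10 t.reverse)).reverse = h' :: rest := by
    cases hc : (Nat.digits 10 (Nat.ofDigits 10 t.reverse)).reverse with
    | nil => exact absurd (by simpa using congrArg List.reverse hc) hdig_ne
    | cons a b => exact ⟨a, b, rfl⟩
  have hhead' : (Nat.digits 10 (Nat.ofDigits 10 t.reverse)).getLast hdig_ne = h' := by
    have h1 : (Nat.digits 10 (Nat.ofDigits 10 t.reverse)).reverse.head? = some h' := by
      rw [hrev]; rfl
    rw [List.head?_reverse, List.getLast?_eq_some_getLast hdig_ne] at h1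
    exact Option.some.inj h1
  have hne0 : h' ≠ 0 := hhead' ▸ hlast
  have hlt10 : h' < 10 := by
    have hmem : h' ∈ Nat.digits 10 (Nat.ofDigits 10 t.reverse) := by
      apply List.mem_reverse.mp; rw [hrev]; simp
    exact Nat.digits_lt_base (by norm_num) hmem
  rw [hrev, Nat.ofDigits_cons, Nat.ofDigits_cons] at heq
  omega
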